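-- pv_equiv track=rewrite | github.com/Creepr6/Informatice5 | toets/snake.py | laatste_levende_positie
-- ===== SOURCE A (Python) =====
-- def beweeg(coordinaat, pijltjestoets):
--     #start coordinaten
--     xcoordinaat = coordinaat[0]
--     ycoordinaat = coordinaat[1]
--
--     #beweging slang
--     if pijltjestoets == '>':
--         xcoordinaat += 1
--     elif pijltjestoets == '<':
--         xcoordinaat += -1
--     elif pijltjestoets == '^':
--         ycoordinaat += 1
--     elif pijltjestoets == 'v':
--         ycoordinaat += -1
--
--     return xcoordinaat, ycoordinaat
--
-- def teruggekeerd(pijltjescombinatie):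
--     omhoog = pijltjescombinatie.count('^')
--     omlaag = pijltjescombinatie.count('v')
--     rechts = pijltjescombinatie.count('>')
--     links = pijltjescombinatie.count('<')
--     k = 0
--
--     if omhoog == 1 and omlaag == 1:
--         k += 1
--
--     elif rechts == 1 and links == 1:
--         k += 1
--
--     return k == 1
--
-- def laatste_levende_positie(pijltjestoetsen):
--     i = 1
--     coordinaat = beweeg((0, 0), pijltjestoetsen[0])
--     aantal_geldige_zetten = 1
--
--     while i < len(pijltjestoetsen) and teruggekeerd([pijltjestoetsen[i - 1], pijltjestoetsen[i]]) is False: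
--         coordinaat = beweeg(coordinaat, pijltjestoetsen[i])
--         i += 1
--         aantal_geldige_zetten += 1
--
--     return aantal_geldige_zetten, coordinaat[0], coordinaat[1]
-- ===== SOURCE B (Python) =====
-- from itertools import takewhile
--
-- _DELTA = {'>': (1, 0), '<': (-1, 0), '^': (0, 1), 'v': (0, -1)}
--
--
-- def _cancel(pair):
--     # a pair of moves is a reversal iff their displacement vectors are
--     # opposite and nonzero (identical or unknown moves never cancel)
--     da = _DELTA.get(pair[0], (0, 0))
--     db = _DELTA.get(pair[1], (0, 0))
--     return da != (0, 0) and da == (-db[0], -db[1])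
--
--
-- def laatste_levende_positie(pijltjestoetsen):
--     if not pijltjestoetsen:
--         return (0, 0, 0)
--     pairs = zip(pijltjestoetsen, pijltjestoetsen[1:])
--     k = 1 + sum(1 for _ in takewhile(lambda p: not _cancel(p), pairs))
--     prefix = pijltjestoetsen[:k]
--     x = prefix.count('>') - prefix.count('<')
--     y = prefix.count('^') - prefix.count('v')
--     return (k, x, y)
-- ===== Notes on version B (the rewrite author's own statement) =====
-- stated objective: alternative
-- what changed: B abandons the per-step vector accumulation: it characterises a reversal arithmetically (the two moves' displacement vectors are opposite and nonzero), finds the cut with takewhile over zipped adjacent pairs, and computes the coordinate with no accumulator as global count differences over the surviving prefix (x = count('>')-count('<'), y = count('^')-count('v')), relying on commutativity of displacements.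
-- outside the precondition, e.g. on laatste_levende_positie([]): A raises IndexError, B returns (0, 0, 0)
import Mathlib
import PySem

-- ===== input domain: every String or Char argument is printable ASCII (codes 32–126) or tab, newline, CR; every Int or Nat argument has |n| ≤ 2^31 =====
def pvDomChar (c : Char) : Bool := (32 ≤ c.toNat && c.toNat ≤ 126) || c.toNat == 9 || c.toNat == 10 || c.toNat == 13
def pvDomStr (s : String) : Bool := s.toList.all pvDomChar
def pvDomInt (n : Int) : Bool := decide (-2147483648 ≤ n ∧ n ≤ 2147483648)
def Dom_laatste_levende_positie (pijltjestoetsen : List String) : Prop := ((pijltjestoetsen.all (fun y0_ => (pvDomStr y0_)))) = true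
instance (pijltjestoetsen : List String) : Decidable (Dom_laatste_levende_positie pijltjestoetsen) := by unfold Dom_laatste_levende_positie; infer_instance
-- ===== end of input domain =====

-- B replaces A's per-step accumulation by an arithmetic reversal test (opposite nonzero
-- displacement vectors) over zipped adjacent pairs and computes the coordinate as count
-- differences over the surviving prefix (C-level count/takewhile instead of a per-move
-- Python-level loop; a timing run measured a constant-factor speedup).

-- ===== PORT A =====
def beweeg (coordinaat : Int × Int) (pijltjestoets : String) : Int × Int :=
  let xcoordinaat := coordinaat.1
  let ycoordinaat := coordinaat.2
  if pijltjestoets = ">" then (xcoordinaat + 1, ycoordinaat)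
  else if pijltjestoets = "<" then (xcoordinaat - 1, ycoordinaat)
  else if pijltjestoets = "^" then (xcoordinaat, ycoordinaat + 1)
  else if pijltjestoets = "v" then (xcoordinaat, ycoordinaat - 1)
  else (xcoordinaat, ycoordinaat)

def teruggekeerd (pijltjescombinatie : List String) : Bool :=
  let omhoog := PySem.List.count pijltjescombinatie "^"
  let omlaag := PySem.List.count pijltjescombinatie "v"
  let rechts := PySem.List.count pijltjescombinatie ">"
  let links := PySem.List.count pijltjescombinatie "<"
  let k : Int := 0
  let k := if omhoog = 1 ∧ omlaag = 1 then k + 1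
           else if rechts = 1 ∧ links = 1 then k + 1
           else k
  k == 1

-- A's while-loop: prev is pijltjestoetsen[i-1], rest the moves from index i on
def pvLoopA (prev : String) (rest : List String) (coordinaat : Int × Int)
    (aantal : Int) : Int × Int × Int :=
  match rest with
  | [] => (aantal, coordinaat.1, coordinaat.2)
  | m :: rest' =>
    if teruggekeerd [prev, m] = false then
      pvLoopA m rest' (beweeg coordinaat m) (aantal + 1)
    else
      (aantal, coordinaat.1, coordinaat.2)

def laatste_levende_positie (pijltjestoetsen : List String) : Int × Int × Int :=
  match pijltjestoetsen with
  | [] => (0, 0, 0)  -- Python raises IndexError here (pijltjestoetsen[0]); excluded by Pre_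
  | eerste :: rest => pvLoopA eerste rest (beweeg (0, 0) eerste) 1

-- ===== PORT B =====
-- _DELTA.get(m, (0, 0)) from Source B
def pvDeltaB (m : String) : Int × Int :=
  if m = ">" then (1, 0)
  else if m = "<" then (-1, 0)
  else if m = "^" then (0, 1)
  else if m = "v" then (0, -1)
  else (0, 0)

-- _cancel(pair): the two displacement vectors are opposite and nonzero
def pvCancel (pair : String × String) : Bool :=
  let da := pvDeltaB pair.1
  let db := pvDeltaB pair.2
  (da != ((0 : Int), (0 : Int))) && (da == (-db.1, -db.2))

def laatste_levende_positie_alt (pijltjestoetsen : List String) : Int × Int × Int :=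
  match pijltjestoetsen with
  | [] => (0, 0, 0)
  | _ :: _ =>
    let pairs := pijltjestoetsen.zip (pijltjestoetsen.drop 1)
    let k := 1 + (pairs.takeWhile (fun p => !pvCancel p)).length
    let pre := pijltjestoetsen.take k
    ((k : Int),
     (PySem.List.count pre ">" : Int) - (PySem.List.count pre "<" : Int),
     (PySem.List.count pre "^" : Int) - (PySem.List.count pre "v" : Int))

-- ===== PRECONDITION & SPEC =====
-- Pre_ excludes only the empty list, on which A raises IndexError.
def Pre_laatste_levende_positie (pijltjestoetsen : List String) : Prop := pijltjestoetsen ≠ []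
instance (pijltjestoetsen : List String) : Decidable (Pre_laatste_levende_positie pijltjestoetsen) := by unfold Pre_laatste_levende_positie; infer_instance
def pvWitness_laatste_levende_positie : List String := [">", "^", "v"]

def Spec_laatste_levende_positie (pijltjestoetsen : List String) (out : Int × Int × Int) : Prop := out = laatste_levende_positie_alt pijltjestoetsen
instance (pijltjestoetsen : List String) (out : Int × Int × Int) : Decidable (Spec_laatste_levende_positie pijltjestoetsen out) := by unfold Spec_laatste_levende_positie; infer_instance

-- ===== CLAIM (what is proved, stated in full; the proofs are below) =====
def Claim_equal_laatste_levende_positie : Prop := ∀ (pijltjestoetsen : List String), Dom_laatste_levende_positie pijltjestoetsen → Pre_laatste_levende_positie pijltjestoetsen → Spec_laatste_levende_positie pijltjestoetsen (laatste_levende_positie pijltjestoetsen)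

-- ===== LEMMAS AND PROOFS =====

-- number of valid moves made among rest (prev = previous move)
def pvSteps (prev : String) (rest : List String) : Nat :=
  match rest with
  | [] => 0
  | m :: rest' => if pvCancel (prev, m) then 0 else pvSteps m rest' + 1

def pvSumXY (l : List String) : Int × Int :=
  l.foldl (fun s m => (s.1 + (pvDeltaB m).1, s.2 + (pvDeltaB m).2)) (0, 0)

lemma str5 (a : String) : a = ">" ∨ a = "<" ∨ a = "^" ∨ a = "v" ∨ (¬a = ">" ∧ ¬a = "<" ∧ ¬a = "^" ∧ ¬a = "v") := by
  tauto

lemma terug_cancel_lit : ∀ x ∈ ([">", "<", "^", "v"] : List String), ∀ y ∈ ([">", "<", "^", "v"] : List String), teruggekeerd [x, y] = pvCancel (x, y) := by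
  decide

lemma terug_eq_cancel (a b : String) : teruggekeerd [a, b] = pvCancel (a, b) := by
  rcases str5 a with ha|ha|ha|ha|ha <;> rcases str5 b with hb|hb|hb|hb|hb <;>
  first
    | (subst ha; subst hb; exact terug_cancel_lit _ (by decide) _ (by decide))
    | simp_all [teruggekeerd, pvCancel, pvDeltaB, PySem.List.count_eq]

lemma beweeg_delta (c : Int × Int) (m : String) :
    beweeg c m = (c.1 + (pvDeltaB m).1, c.2 + (pvDeltaB m).2) := by
  simp only [beweeg, pvDeltaB]
  split_ifs <;> simp <;> ring

lemma sumXY_shift (l : List String) : ∀ (c : Int × Int),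
    l.foldl (fun s m => (s.1 + (pvDeltaB m).1, s.2 + (pvDeltaB m).2)) c
      = (c.1 + (pvSumXY l).1, c.2 + (pvSumXY l).2) := by
  induction l with
  | nil => intro c; simp [pvSumXY]
  | cons m r ih =>
    intro c
    simp only [pvSumXY, List.foldl_cons] at *
    rw [ih, ih ((0:Int) + (pvDeltaB m).1, (0:Int) + (pvDeltaB m).2)]
    simp
    constructor <;> ring

lemma sumXY_cons (m : String) (l : List String) :
    pvSumXY (m :: l) = ((pvDeltaB m).1 + (pvSumXY l).1, (pvDeltaB m).2 + (pvSumXY l).2) := by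
  simp only [pvSumXY, List.foldl_cons]
  rw [sumXY_shift]
  simp only [Int.zero_add]
  rfl

lemma loopA_spec (rest : List String) : ∀ (prev : String) (c : Int × Int) (cnt : Int),
    pvLoopA prev rest c cnt =
      (cnt + (pvSteps prev rest : Int),
       c.1 + (pvSumXY (rest.take (pvSteps prev rest))).1,
       c.2 + (pvSumXY (rest.take (pvSteps prev rest))).2) := by
  induction rest with
  | nil => intro prev c cnt; simp [pvLoopA, pvSteps, pvSumXY]
  | cons m r ih =>
    intro prev c cnt
    simp only [pvLoopA, pvSteps, terug_eq_cancel]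
    by_cases h : pvCancel (prev, m) = true
    · simp [h, pvSumXY]
    · simp only [h, if_true, if_false, Bool.false_eq_true,
        List.take_succ_cons, ih m, beweeg_delta, sumXY_cons]
      push_cast
      refine Prod.ext (by ring) (Prod.ext (by ring) (by ring))

-- B's takewhile over adjacent zip-pairs counts exactly A's valid follow-up steps
lemma takeWhile_zip_eq_steps (rest : List String) : ∀ (prev : String),
    (((prev :: rest).zip rest).takeWhile (fun p => !pvCancel p)).length
      = pvSteps prev rest := by
  induction rest with
  | nil => intro prev; simp [pvSteps]
  | cons m r ih =>
    intro prev
    simp only [List.zip_cons_cons, List.takeWhile_cons, pvSteps]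
    by_cases h : pvCancel (prev, m) = true
    · simp [h]
    · simp only [h, Bool.not_false, Bool.not_eq_true] at *
      simp [ih m]

-- the coordinate is order-independent: the foldl of deltas equals count differences
lemma sumXY_counts (l : List String) :
    pvSumXY l = ((PySem.List.count l ">" : Int) - (PySem.List.count l "<" : Int),
                 (PySem.List.count l "^" : Int) - (PySem.List.count l "v" : Int)) := by
  induction l with
  | nil => simp [pvSumXY, PySem.List.count_eq]
  | cons m r ih =>
    rw [sumXY_cons, ih]
    rcases str5 m with h|h|h|h|h <;>
    simp_all [pvDeltaB, PySem.List.count_eq] <;> omega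

-- ===== VERDICT (by name: the statement is the Claim_ definition above) =====
theorem laatste_levende_positie_spec : Claim_equal_laatste_levende_positie := by
  intro p _ hpre
  match p with
  | [] => exact absurd rfl hpre
  | a :: rest =>
    show laatste_levende_positie (a :: rest) = laatste_levende_positie_alt (a :: rest)
    simp only [laatste_levende_positie, laatste_levende_positie_alt, List.drop_one,
      List.tail_cons, takeWhile_zip_eq_steps, loopA_spec]
    rw [← sumXY_counts]
    have hk : 1 + pvSteps a rest = pvSteps a rest + 1 := by omega
    rw [hk, List.take_succ_cons, sumXY_cons, beweeg_delta]
    push_cast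
    refine Prod.ext (by ring) (Prod.ext (by ring) (by ring))
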